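-- pv_equiv track=rewrite | github.com/tzyl/aoc21 | day23/solution23.py | get_possible_leave_short_room_target
-- ===== SOURCE A (Python) =====
-- from typing import Generator, Generic, Literal, TypeGuard, TypeVar
--
-- Amphipod = Literal["A", "B", "C", "D"]
--
-- ShortRoom = tuple[Amphipod | None, Amphipod | None]
--
-- def get_possible_leave_short_room_target(
--     room: ShortRoom, room_type: Amphipod
-- ) -> tuple[Amphipod, int, ShortRoom] | None:
--     amphipod: Amphipod
--     steps_to_leave_room: int
--     next_room: ShortRoom
--
--     a0, a1 = room[0], room[1]
--     if a0 is not None and a1 is not None: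
--         if all(a == room_type for a in (a0, a1)):
--             return None
--         amphipod = a1
--         steps_to_leave_room = 1
--         next_room = (a0, None)
--     elif a0 is not None and a1 is None:
--         if all(a == room_type for a in (a0,)):
--             return None
--         amphipod = a0
--         steps_to_leave_room = 2
--         next_room = (None, None)
--     else:
--         return None
--
--     return amphipod, steps_to_leave_room, next_room
-- ===== SOURCE B (Python) =====
-- def get_possible_leave_short_room_target(room, room_type):
--     # Recursive scan: walk the slots bottom-up while they are occupied,
--     # accumulating the contiguous stack of occupants; on the first gap
--     # (or the end) pop the top of the stack.
--     def go(slots, stack):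
--         if slots and slots[0] is not None:
--             return go(slots[1:], stack + [slots[0]])
--         if not stack or all(a == room_type for a in stack):
--             return None
--         top_index = len(stack) - 1
--         rest = stack[:-1]
--         next_room = tuple(rest + [None] * (len(room) - len(rest)))
--         return stack[-1], len(room) - top_index, next_room
--
--     return go(list(room), [])
-- ===== Notes on version B (the rewrite author's own statement) =====
-- stated objective: alternative
-- what changed: Replaces A's explicit enumeration of the room's filled/empty states with a recursive bottom-up scan that accumulates the contiguous stack of occupants and then pops its top (generic in room depth).
import Mathlib
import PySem

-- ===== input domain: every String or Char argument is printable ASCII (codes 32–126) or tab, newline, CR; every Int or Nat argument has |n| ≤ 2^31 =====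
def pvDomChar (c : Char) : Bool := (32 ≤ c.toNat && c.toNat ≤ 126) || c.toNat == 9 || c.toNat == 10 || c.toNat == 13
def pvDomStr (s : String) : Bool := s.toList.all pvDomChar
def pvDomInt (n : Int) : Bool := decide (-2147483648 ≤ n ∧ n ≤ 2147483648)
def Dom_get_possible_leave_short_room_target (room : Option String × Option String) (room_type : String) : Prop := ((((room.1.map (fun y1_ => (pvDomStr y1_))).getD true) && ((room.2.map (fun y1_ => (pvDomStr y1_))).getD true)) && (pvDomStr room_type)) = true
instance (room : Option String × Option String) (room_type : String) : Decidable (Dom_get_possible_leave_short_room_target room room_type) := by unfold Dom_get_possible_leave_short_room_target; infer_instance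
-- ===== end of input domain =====

-- B replaces A's explicit three-state enumeration with a recursive bottom-up stack scan generic in room depth (objective: alternative).


-- ===== PORT A =====
def get_possible_leave_short_room_target (room : Option String × Option String) (room_type : String) : Option (String × Int × (Option String × Option String)) :=
  match room.1, room.2 with
  | some a0, some a1 =>
      if [a0, a1].all (fun a => a == room_type) then none
      else some (a1, 1, (some a0, none))
  | some a0, none =>
      if [a0].all (fun a => a == room_type) then none
      else some (a0, 2, (none, none))
  | _, _ => none

-- ===== PORT B =====
-- go(slots, stack): recursive bottom-up scan over the slots, accumulating the
-- contiguous stack of occupants; on the first gap (or the end), pop the top.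
-- the pop step at the end of the scan ("not stack or all(...)" then pop the top)
def pvPopB (room_type : String) (roomLen : Nat) (stack : List String) : Option (String × Int × (Option String × Option String)) :=
  if stack = [] ∨ stack.all (fun x => x == room_type) then none
  else
    let top_index : Nat := stack.length - 1
    let rest : List String := stack.dropLast
    -- Python's tuple(rest + [None] * (len(room) - len(rest))) realized as the 2-slot pair
    let padded : List (Option String) := rest.map some ++ List.replicate (roomLen - rest.length) (none : Option String)
    some (stack.getLastD "", ((roomLen : Int) - (top_index : Int)), (padded.getD 0 none, padded.getD 1 none))

def pvGoB (room_type : String) (roomLen : Nat) (slots : List (Option String)) (stack : List String) : Option (String × Int × (Option String × Option String)) :=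
  match slots with
  | some a :: rest => pvGoB room_type roomLen rest (stack ++ [a])
  | none :: _ => pvPopB room_type roomLen stack
  | [] => pvPopB room_type roomLen stack

def get_possible_leave_short_room_target_alt (room : Option String × Option String) (room_type : String) : Option (String × Int × (Option String × Option String)) :=
  pvGoB room_type 2 [room.1, room.2] []

-- ===== PRECONDITION & SPEC =====
def Spec_get_possible_leave_short_room_target (room : Option String × Option String) (room_type : String) (out : Option (String × Int × (Option String × Option String))) : Prop := out = get_possible_leave_short_room_target_alt room room_type
instance (room : Option String × Option String) (room_type : String) (out : Option (String × Int × (Option String × Option String))) : Decidable (Spec_get_possible_leave_short_room_target room room_type out) := by unfold Spec_get_possible_leave_short_room_target; infer_instance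

-- ===== CLAIM (what is proved, stated in full; the proofs are below) =====
def Claim_equal_get_possible_leave_short_room_target : Prop := ∀ (room : Option String × Option String) (room_type : String), Dom_get_possible_leave_short_room_target room room_type → Spec_get_possible_leave_short_room_target room room_type (get_possible_leave_short_room_target room room_type)

-- ===== LEMMAS AND PROOFS =====

-- ===== VERDICT (by name: the statement is the Claim_ definition above) =====
theorem get_possible_leave_short_room_target_spec : Claim_equal_get_possible_leave_short_room_target := by
  intro room room_type _
  unfold Spec_get_possible_leave_short_room_target
  unfold get_possible_leave_short_room_target get_possible_leave_short_room_target_alt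
  obtain ⟨o0, o1⟩ := room
  cases o0 <;> cases o1 <;> simp [pvGoB, pvPopB, List.getLastD]
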